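-- pv_equiv track=rewrite | github.com/WronskaBlack/kurs_python | 4_python_sredniozaawansowany/day3/iterators_generators.py | not_divided_generator
-- ===== SOURCE A (Python) =====
-- def not_divided_generator(n, m):
--     number = 0
--     numbers_generated = 0
--     while numbers_generated != n:
--         number += 1
--         if number % m != 0:
--             numbers_generated += 1
--             yield number
-- ===== SOURCE B (Python) =====
-- def not_divided_generator(n, m):
--     # closed form: the k-th positive integer not divisible by m is k + (k-1)//(abs(m)-1)
--     d = abs(m) - 1
--     k = 0
--     while k != n:
--         k += 1
--         yield k + (k - 1) // d
-- ===== Notes on version B (the rewrite author's own statement) =====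
-- stated objective: alternative
-- what changed: Replaces the test-every-integer skip loop by the closed form k + (k-1)//(|m|-1) for the k-th non-multiple, so no divisibility test is performed.
import Mathlib
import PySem

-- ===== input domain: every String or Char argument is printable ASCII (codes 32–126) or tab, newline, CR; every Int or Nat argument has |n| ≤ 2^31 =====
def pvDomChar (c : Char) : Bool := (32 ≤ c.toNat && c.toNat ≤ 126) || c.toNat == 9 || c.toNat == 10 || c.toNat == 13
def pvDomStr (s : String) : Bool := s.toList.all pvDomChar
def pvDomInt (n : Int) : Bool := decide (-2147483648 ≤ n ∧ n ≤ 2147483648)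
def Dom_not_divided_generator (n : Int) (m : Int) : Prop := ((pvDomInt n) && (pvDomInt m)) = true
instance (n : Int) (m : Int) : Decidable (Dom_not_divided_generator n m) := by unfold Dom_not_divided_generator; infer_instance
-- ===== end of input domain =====

-- B replaces A's test-every-integer skip loop by the closed form k + (k-1)//(|m|-1)
-- for the k-th positive non-multiple of m (alternative algorithm, no divisibility test).

-- ===== PORT A =====
-- A's while-loop; the fuel only makes the recursion total (under Pre_ the loop
-- stops by its own condition within 2*n.toNat+1 iterations, which is proved below).
def aLoop (n m : Int) : Nat → Int → Int → List Int
  | 0, _, _ => []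
  | fuel+1, number, cnt =>
    if cnt ≠ n then
      if PySem.Int.mod (number + 1) m ≠ 0 then
        (number + 1) :: aLoop n m fuel (number + 1) (cnt + 1)
      else
        aLoop n m fuel (number + 1) cnt
    else []

def not_divided_generator (n : Int) (m : Int) : List Int :=
  aLoop n m (2 * n.toNat + 1) 0 0

-- ===== PORT B =====
-- B's while-loop; fuel n.toNat is exactly the number of iterations of `while k != n`
-- for n ≥ 0 (and 0 for n < 0, where the Python loop never terminates — excluded by Pre_).
def altLoop (n d : Int) : Nat → Int → List Int
  | 0, _ => []
  | fuel+1, k =>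
    if k ≠ n then
      (k + 1 + PySem.Int.floordiv (k + 1 - 1) d) :: altLoop n d fuel (k + 1)
    else []

def not_divided_generator_alt (n : Int) (m : Int) : List Int :=
  altLoop n (|m| - 1) n.toNat 0

-- ===== PRECONDITION & SPEC =====
-- Pre_ excludes exactly the inputs where the generator A never returns a finite list:
-- n < 0 (the loop condition `numbers_generated != n` never becomes true) and
-- n > 0 with |m| ≤ 1 (m = 0 raises ZeroDivisionError; m = ±1 loops forever, never yielding).
def Pre_not_divided_generator (n : Int) (m : Int) : Prop := 0 ≤ n ∧ (n = 0 ∨ 2 ≤ |m|)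
instance (n : Int) (m : Int) : Decidable (Pre_not_divided_generator n m) := by
  unfold Pre_not_divided_generator; infer_instance

def pvWitness_not_divided_generator : Int × Int := (5, 3)

def Spec_not_divided_generator (n : Int) (m : Int) (out : List Int) : Prop := out = not_divided_generator_alt n m
instance (n : Int) (m : Int) (out : List Int) : Decidable (Spec_not_divided_generator n m out) := by unfold Spec_not_divided_generator; infer_instance

-- ===== CLAIM (what is proved, stated in full; the proofs are below) =====
def Claim_equal_not_divided_generator : Prop := ∀ (n : Int) (m : Int), Dom_not_divided_generator n m → Pre_not_divided_generator n m → Spec_not_divided_generator n m (not_divided_generator n m)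

-- ===== LEMMAS AND PROOFS =====

-- the value of A's `number` (= B's yielded value) after c yields: the c-th positive non-multiple
def gg (d : Nat) : Nat → Nat
  | 0 => 0
  | c+1 => c + 1 + c / d

-- one step of the sequence: the next candidate gg d c + 1 is either a non-multiple of d+1
-- (and is the next value), or a multiple, in which case gg d c + 2 is the next value.
lemma gstep (d : Nat) (hd : 1 ≤ d) (c : Nat) :
    (gg d (c+1) = gg d c + 1 ∧ (gg d c + 1) % (d+1) ≠ 0) ∨
    (gg d (c+1) = gg d c + 2 ∧ (gg d c + 1) % (d+1) = 0 ∧ (gg d c + 2) % (d+1) ≠ 0) := by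
  match c with
  | 0 =>
    left
    constructor
    · simp [gg]
    · simp [gg, Nat.mod_eq_of_lt (show 1 < d + 1 by omega)]
  | c+1 =>
    have hbs := Nat.div_add_mod c d
    have hslt : c % d < d := Nat.mod_lt _ (by omega)
    set b := c / d with hb
    set s := c % d with hsdef
    have e1 : gg d (c+1) = c + 1 + b := rfl
    by_cases hlast : s = d - 1
    · right
      have hmul : d * (b + 1) = d * b + d := by ring
      have hdiv1 : (c+1) / d = b + 1 := by
        have h1 : c + 1 = d * (b + 1) := by omega
        rw [h1, Nat.mul_div_cancel_left _ (show 0 < d by omega)]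
      have e2 : gg d (c+1+1) = c + 2 + (b + 1) := by
        simp only [gg]
        rw [hdiv1]
      have hfac : (d+1) * (b+1) = d * b + d + b + 1 := by ring
      refine ⟨by omega, ?_, ?_⟩
      · have h3 : gg d (c+1) + 1 = (d+1) * (b+1) := by omega
        rw [h3, Nat.mul_mod_right]
      · have h4 : gg d (c+1) + 2 = (d+1) * (b+1) + 1 := by omega
        rw [h4, Nat.mul_add_mod, Nat.mod_eq_of_lt (show 1 < d + 1 by omega)]
        omega
    · left
      have hdiv1 : (c+1) / d = b := by
        have h1 : c + 1 = d * b + (s + 1) := by omega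
        rw [h1, Nat.mul_add_div (show 0 < d by omega), Nat.div_eq_of_lt (show s + 1 < d by omega)]
        omega
      have e2 : gg d (c+1+1) = c + 2 + b := by
        simp only [gg]
        rw [hdiv1]
      have hfac : (d+1) * b = d * b + b := by ring
      refine ⟨by omega, ?_⟩
      have h3 : gg d (c+1) + 1 = (d+1) * b + (s + 2) := by omega
      rw [h3, Nat.mul_add_mod, Nat.mod_eq_of_lt (show s + 2 < d + 1 by omega)]
      omega

-- zero test of Python's `number % m` is divisibility by |m|
lemma mod_zero_iff (m : Int) (x : Nat) :
    PySem.Int.mod (x : Int) m = 0 ↔ x % m.natAbs = 0 := by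
  rw [PySem.Int.mod_eq_zero_iff_dvd]
  rw [← Int.natAbs_dvd, Int.natCast_dvd_natCast]
  exact ⟨fun h => Nat.mod_eq_zero_of_dvd h, fun h => Nat.dvd_of_mod_eq_zero h⟩

lemma aLoop_eq (n m : Int) (hm : 2 ≤ m.natAbs) :
    ∀ (k c fuel : Nat), 2 * k + 1 ≤ fuel → n = (c : Int) + k →
      aLoop n m fuel (gg (m.natAbs - 1) c) c
        = (List.range k).map (fun i => (gg (m.natAbs - 1) (c+1+i) : Int)) := by
  intro k
  induction k with
  | zero =>
    intro c fuel hfuel hn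
    match fuel, hfuel with
    | f+1, _ =>
      have hc : (c : Int) = n := by push_cast at hn; omega
      simp [aLoop, hc]
  | succ k ih =>
    intro c fuel hfuel hn
    match fuel, hfuel with
    | f+1, hfuel =>
      have hne : (c : Int) ≠ n := by omega
      have hd : 1 ≤ m.natAbs - 1 := by omega
      have hmm : m.natAbs - 1 + 1 = m.natAbs := by omega
      have hm0 : m ≠ 0 := by
        intro h; rw [h] at hm; simp at hm
      set d := m.natAbs - 1 with hdd
      have hcast : ((gg d c : Int) + 1) = ((gg d c + 1 : Nat) : Int) := by push_cast; ring
      have hcnt : ((c : Int) + 1) = ((c + 1 : Nat) : Int) := by push_cast; ring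
      have hrange : (List.range (k+1)).map (fun i => (gg d (c+1+i) : Int))
          = (gg d (c+1) : Int) :: (List.range k).map (fun i => (gg d (c+1+1+i) : Int)) := by
        rw [List.range_succ_eq_map, List.map_cons, List.map_map]
        refine congrArg₂ List.cons rfl ?_
        apply List.map_congr_left
        intro i _
        simp only [Function.comp_apply]
        congr 2
        omega
      rcases gstep d hd c with ⟨he, hnz⟩ | ⟨he, hz, hnz⟩
      · have hcond : PySem.Int.mod ((gg d c : Int) + 1) m ≠ 0 := by
          rw [hcast]
          intro h
          exact hnz (hmm ▸ (mod_zero_iff m _).mp h)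
        have hrec : ((gg d c : Int) + 1) = (gg d (c+1) : Int) := by
          rw [he]; push_cast; ring
        simp only [aLoop]
        rw [if_pos hne, if_pos hcond, hrec, hcnt,
          ih (c+1) f (by omega) (by push_cast; push_cast at hn; omega), hrange]
      · have hcond : ¬ PySem.Int.mod ((gg d c : Int) + 1) m ≠ 0 := by
          rw [hcast]
          exact not_not_intro ((mod_zero_iff m _).mpr (hmm ▸ hz))
        match f, hfuel with
        | f'+1, _ =>
          have hcast2 : ((gg d c : Int) + 1 + 1) = ((gg d c + 2 : Nat) : Int) := by push_cast; ring
          have hcond2 : PySem.Int.mod ((gg d c : Int) + 1 + 1) m ≠ 0 := by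
            rw [hcast2]
            intro h
            exact hnz (hmm ▸ (mod_zero_iff m _).mp h)
          have hrec : ((gg d c : Int) + 1 + 1) = (gg d (c+1) : Int) := by
            rw [he]; push_cast; ring
          simp only [aLoop]
          rw [if_pos hne, if_neg hcond, if_pos hne, if_pos hcond2, hrec, hcnt,
            ih (c+1) f' (by omega) (by push_cast; push_cast at hn; omega), hrange]

lemma altLoop_eq (n : Int) (dN : Nat) :
    ∀ (f c : Nat), n = (c : Int) + f →
      altLoop n (dN : Int) f (c : Int)
        = (List.range f).map (fun i => (gg dN (c+1+i) : Int)) := by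
  intro f
  induction f with
  | zero => intro c hn; simp [altLoop]
  | succ f ih =>
    intro c hn
    have hne : (c : Int) ≠ n := by omega
    have hhead : (c : Int) + 1 + PySem.Int.floordiv ((c : Int) + 1 - 1) (dN : Int)
        = (gg dN (c+1) : Int) := by
      have h1 : ((c : Int) + 1 - 1) = (c : Int) := by ring
      rw [h1, PySem.Int.floordiv_natCast]
      show _ = ((c + 1 + c / dN : Nat) : Int)
      push_cast; ring
    have hcnt : ((c : Int) + 1) = ((c + 1 : Nat) : Int) := by push_cast; ring
    simp only [altLoop]
    rw [if_pos hne, hhead, hcnt, ih (c+1) (by push_cast; push_cast at hn; omega)]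
    rw [List.range_succ_eq_map, List.map_cons, List.map_map]
    refine congrArg₂ List.cons rfl ?_
    apply List.map_congr_left
    intro i _
    simp only [Function.comp_apply]
    congr 2
    omega

-- ===== VERDICT (by name: the statement is the Claim_ definition above) =====
theorem not_divided_generator_spec : Claim_equal_not_divided_generator := by
  intro n m _ hpre
  unfold Spec_not_divided_generator
  rcases hpre with ⟨hn, hcase⟩
  rcases hcase with h0 | habs
  · subst h0
    simp [not_divided_generator, not_divided_generator_alt, aLoop, altLoop]
  · have hmabs : 2 ≤ m.natAbs := by
      have : (m.natAbs : Int) = |m| := Int.abs_eq_natAbs m ▸ rfl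
      omega
    have hN : n = ((n.toNat : Nat) : Int) + (0 : Nat) := by push_cast; omega
    have hA : not_divided_generator n m
        = (List.range n.toNat).map (fun i => (gg (m.natAbs - 1) (0+1+i) : Int)) := by
      unfold not_divided_generator
      have := aLoop_eq n m hmabs n.toNat 0 (2 * n.toNat + 1) (by omega) (by push_cast; omega)
      simpa [gg] using this
    have hB : not_divided_generator_alt n m
        = (List.range n.toNat).map (fun i => (gg (m.natAbs - 1) (0+1+i) : Int)) := by
      unfold not_divided_generator_alt
      have hd : |m| - 1 = ((m.natAbs - 1 : Nat) : Int) := by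
        have : (m.natAbs : Int) = |m| := Int.abs_eq_natAbs m ▸ rfl
        push_cast [Nat.cast_sub (by omega : 1 ≤ m.natAbs)]
        omega
      rw [hd]
      have := altLoop_eq n (m.natAbs - 1) n.toNat 0 (by push_cast; omega)
      simpa using this
    rw [hA, hB]
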